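-- pv_equiv track=rewrite | github.com/jinbuw/mpbdb | src/lib/libpdb.py | resids2segs
-- ===== SOURCE A (Python) =====
-- def resids2segs(resids, break_resids=[]):
--     resids.sort()
--     segs = []
--     _seg = [resids[0]]
--     num_res = len(resids)
--     #print "# tot_res:%4d " % num_res
--     for i in range(1, num_res):
--         pre_resid = resids[i-1]
--         resid = resids[i]
--         if resid in break_resids:
--             segs.append(_seg)
--             _seg = [resid]
--         elif resid - pre_resid == 1:
--             _seg.append(resid)
--         else:
--             segs.append(_seg)
--             _seg = [resid]
--     segs.append(_seg)
--     return segs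
-- ===== SOURCE B (Python) =====
-- def resids2segs(resids, break_resids=[]):
--     # Same in-place resids.sort(); segments are cut out as whole slices at the
--     # break boundaries instead of being grown element-by-element in a buffer.
--     resids.sort()
--     segs = []
--     start = 0
--     for i in range(1, len(resids)):
--         x = resids[i]
--         if x in break_resids or x - resids[i-1] != 1:
--             segs.append(resids[start:i])
--             start = i
--     segs.append(resids[start:])
--     return segs
-- ===== Notes on version B (the rewrite author's own statement) =====
-- stated objective: alternative
-- what changed: replaces the growing current-segment buffer (seeded with resids[0], extended element-by-element and flushed at breaks) by an integer start index: the loop only records where segments begin and emits each segment as one slice resids[start:i]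
import Mathlib
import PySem

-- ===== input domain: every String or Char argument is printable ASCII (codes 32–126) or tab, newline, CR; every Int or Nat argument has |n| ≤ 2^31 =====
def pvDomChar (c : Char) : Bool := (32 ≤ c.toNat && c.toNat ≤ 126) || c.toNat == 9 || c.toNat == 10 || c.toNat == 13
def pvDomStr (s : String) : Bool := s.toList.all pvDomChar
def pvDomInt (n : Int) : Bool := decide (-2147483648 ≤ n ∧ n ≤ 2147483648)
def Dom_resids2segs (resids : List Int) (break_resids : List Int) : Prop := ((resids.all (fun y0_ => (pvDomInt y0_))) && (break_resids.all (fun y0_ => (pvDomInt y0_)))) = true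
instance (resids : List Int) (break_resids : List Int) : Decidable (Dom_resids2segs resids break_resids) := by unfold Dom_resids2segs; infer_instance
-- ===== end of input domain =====

-- B replaces A's growing current-segment buffer by an integer start index and emits
-- each segment as one slice (objective: alternative decomposition, same cost).
-- Both A and B sort `resids` in place (same observable mutation); the equivalence
-- proved is about the return value.

-- ===== PORT A =====
-- loop body of 'for i in range(1, num_res)': state (segs, _seg); indexing is in range
-- for every i the loop produces, so pyGetD's default is never used.
def stepA (break_resids : List Int) (r : List Int) (st : List (List Int) × List Int) (i : Int) : List (List Int) × List Int :=
  let pre_resid := PySem.List.pyGetD r (i - 1) 0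
  let resid := PySem.List.pyGetD r i 0
  if break_resids.contains resid then (st.1 ++ [st.2], [resid])
  else if resid - pre_resid == 1 then (st.1, st.2 ++ [resid])
  else (st.1 ++ [st.2], [resid])

def resids2segs (resids : List Int) (break_resids : List Int) : List (List Int) :=
  match PySem.List.sorted resids (fun x => x) false with
  | [] => []  -- Python raises IndexError at resids[0]; excluded by Pre_
  | r0 :: rest =>
    let r := r0 :: rest
    let st := (PySem.List.pyRange 1 (r.length : Int) 1).foldl (stepA break_resids r) ([], [r0])
    st.1 ++ [st.2]

-- ===== PORT B =====
-- loop body of Source B: state (segs, start); a segment is flushed as the slice r[start:i].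
def stepB (break_resids : List Int) (r : List Int) (st : List (List Int) × Int) (i : Int) : List (List Int) × Int :=
  let x := PySem.List.pyGetD r i 0
  if break_resids.contains x || !(x - PySem.List.pyGetD r (i - 1) 0 == 1) then
    (st.1 ++ [PySem.List.slice r (some st.2) (some i)], i)
  else st

def resids2segs_alt (resids : List Int) (break_resids : List Int) : List (List Int) :=
  let r := PySem.List.sorted resids (fun x => x) false
  let st := (PySem.List.pyRange 1 (r.length : Int) 1).foldl (stepB break_resids r) ([], (0 : Int))
  st.1 ++ [PySem.List.slice r (some st.2) none]

-- ===== PRECONDITION & SPEC =====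
-- Pre_ excludes only the empty list, on which Python A raises IndexError.
def Pre_resids2segs (resids : List Int) (break_resids : List Int) : Prop := resids ≠ []
instance (resids : List Int) (break_resids : List Int) : Decidable (Pre_resids2segs resids break_resids) := by unfold Pre_resids2segs; infer_instance
def pvWitness_resids2segs : List Int × List Int := ([3, 1, 2, 7], [2])

def Spec_resids2segs (resids : List Int) (break_resids : List Int) (out : List (List Int)) : Prop := out = resids2segs_alt resids break_resids
instance (resids : List Int) (break_resids : List Int) (out : List (List Int)) : Decidable (Spec_resids2segs resids break_resids out) := by unfold Spec_resids2segs; infer_instance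

-- ===== CLAIM (what is proved, stated in full; the proofs are below) =====
def Claim_equal_resids2segs : Prop := ∀ (resids : List Int) (break_resids : List Int), Dom_resids2segs resids break_resids → Pre_resids2segs resids break_resids → Spec_resids2segs resids break_resids (resids2segs resids break_resids)

-- ===== LEMMAS AND PROOFS =====

-- the current run [resids[start:i]] extended by resids[i] is [resids[start:i+1]]
theorem slice_extend (r : List Int) (start j : Nat) (hsj : start ≤ j) (hj : j < r.length) :
    PySem.List.slice r (some (start : Int)) (some (j : Int)) ++ [r.getD j 0] =
      PySem.List.slice r (some (start : Int)) (some ((j : Int) + 1)) := by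
  have h1 : ((j : Int) + 1) = ((j + 1 : Nat) : Int) := by push_cast; ring
  rw [h1, PySem.List.slice_natCast, PySem.List.slice_natCast]
  have hdl : j - start < (r.drop start).length := by simp [List.length_drop]; omega
  have : (r.drop start).take (j + 1 - start) =
      (r.drop start).take (j - start) ++ [(r.drop start)[j - start]] := by
    have h2 : j + 1 - start = (j - start) + 1 := by omega
    rw [h2, List.take_add_one, List.getElem?_eq_getElem hdl]
    simp
  rw [this]
  congr 1
  simp [List.getElem_drop, List.getD_eq_getElem?_getD, List.getElem?_eq_getElem hj,
    Nat.add_sub_cancel' hsj]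

-- a freshly started run [resids[i]] is the slice resids[i:i+1]
theorem slice_single (r : List Int) (j : Nat) (hj : j < r.length) :
    PySem.List.slice r (some (j : Int)) (some ((j : Int) + 1)) = [r.getD j 0] := by
  have h1 : ((j : Int) + 1) = ((j + 1 : Nat) : Int) := by push_cast; ring
  rw [h1, PySem.List.slice_natCast]
  have h2 : j + 1 - j = 1 := by omega
  rw [h2, List.take_one, List.head?_drop, List.getElem?_eq_getElem hj]
  simp [List.getD_eq_getElem?_getD, List.getElem?_eq_getElem hj]

-- Loop invariant: A's pending buffer _seg is exactly the slice r[start:j] that B will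
-- flush next, and the already-emitted segments agree.
theorem loop_inv (brs r : List Int) : ∀ (fuel j : Nat), r.length = j + fuel → ∀ (segs : List (List Int)) (start : Nat), start < j →
    (((PySem.List.pyRange (j : Int) (r.length : Int) 1).foldl (stepA brs r)
        (segs, PySem.List.slice r (some (start : Int)) (some (j : Int)))).1 ++
      [((PySem.List.pyRange (j : Int) (r.length : Int) 1).foldl (stepA brs r)
        (segs, PySem.List.slice r (some (start : Int)) (some (j : Int)))).2]) =
    (((PySem.List.pyRange (j : Int) (r.length : Int) 1).foldl (stepB brs r) (segs, (start : Int))).1 ++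
      [PySem.List.slice r
        (some ((PySem.List.pyRange (j : Int) (r.length : Int) 1).foldl (stepB brs r) (segs, (start : Int))).2) none]) := by
  intro fuel
  induction fuel with
  | zero =>
    intro j hlen segs start hsj
    have hnil : PySem.List.pyRange (j : Int) (r.length : Int) 1 = [] :=
      PySem.List.pyRange_one_eq_nil (by omega)
    rw [hnil]
    simp only [List.foldl_nil]
    have : PySem.List.slice r (some (start : Int)) (some (j : Int)) =
        PySem.List.slice r (some (start : Int)) none := by
      rw [PySem.List.slice_natCast, PySem.List.slice_from_natCast]
      apply List.take_of_length_le
      simp [List.length_drop]; omega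
    rw [this]
  | succ fuel ih =>
    intro j hlen segs start hsj
    have hj : j < r.length := by omega
    have hcons : PySem.List.pyRange (j : Int) (r.length : Int) 1 =
        (j : Int) :: PySem.List.pyRange ((j : Int) + 1) (r.length : Int) 1 :=
      PySem.List.pyRange_one_cons (by exact_mod_cast hj)
    have hj1 : ((j : Int) + 1) = ((j + 1 : Nat) : Int) := by push_cast; ring
    have hpre : PySem.List.pyGetD r ((j : Int) - 1) 0 = r.getD (j - 1) 0 := by
      have : ((j : Int) - 1) = ((j - 1 : Nat) : Int) := by omega
      rw [this, PySem.List.pyGetD_natCast]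
    have hcur : PySem.List.pyGetD r (j : Int) 0 = r.getD j 0 := PySem.List.pyGetD_natCast ..
    rw [hcons, List.foldl_cons, List.foldl_cons]
    by_cases hc : r[j]?.getD 0 ∈ brs
    · -- break id: both flush; A restarts _seg = [resids[j]], B restarts start = j
      have hA : stepA brs r (segs, PySem.List.slice r (some (start : Int)) (some (j : Int))) (j : Int) =
          (segs ++ [PySem.List.slice r (some (start : Int)) (some (j : Int))], [r.getD j 0]) := by
        simp [stepA, hcur, hc, List.getD_eq_getElem?_getD]
      have hB : stepB brs r (segs, (start : Int)) (j : Int) =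
          (segs ++ [PySem.List.slice r (some (start : Int)) (some (j : Int))], (j : Int)) := by
        simp [stepB, hpre, hcur, hc, List.getD_eq_getElem?_getD]
      rw [hA, hB, ← slice_single r j hj, hj1]
      exact ih (j + 1) (by omega) _ j (by omega)
    · by_cases hd : r[j]?.getD 0 - r[j - 1]?.getD 0 = 1
      · -- consecutive: A extends _seg, B keeps start
        have hA : stepA brs r (segs, PySem.List.slice r (some (start : Int)) (some (j : Int))) (j : Int) =
            (segs, PySem.List.slice r (some (start : Int)) (some (j : Int)) ++ [r.getD j 0]) := by
          simp [stepA, hpre, hcur, hc, List.getD_eq_getElem?_getD]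
          exact hd
        have hB : stepB brs r (segs, (start : Int)) (j : Int) = (segs, (start : Int)) := by
          simp [stepB, hpre, hcur, hc, List.getD_eq_getElem?_getD]
          exact hd
        rw [hA, hB, slice_extend r start j (by omega) hj, hj1]
        exact ih (j + 1) (by omega) segs start (by omega)
      · -- gap: both flush, as in the break case
        have hA : stepA brs r (segs, PySem.List.slice r (some (start : Int)) (some (j : Int))) (j : Int) =
            (segs ++ [PySem.List.slice r (some (start : Int)) (some (j : Int))], [r.getD j 0]) := by
          simp [stepA, hpre, hcur, hc, hd, List.getD_eq_getElem?_getD]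
        have hB : stepB brs r (segs, (start : Int)) (j : Int) =
            (segs ++ [PySem.List.slice r (some (start : Int)) (some (j : Int))], (j : Int)) := by
          simp [stepB, hpre, hcur, hc, hd, List.getD_eq_getElem?_getD]
        rw [hA, hB, ← slice_single r j hj, hj1]
        exact ih (j + 1) (by omega) _ j (by omega)

-- ===== VERDICT (by name: the statement is the Claim_ definition above) =====
theorem resids2segs_spec : Claim_equal_resids2segs := by
  intro resids break_resids _ hpre
  unfold Spec_resids2segs resids2segs resids2segs_alt
  cases hs : PySem.List.sorted resids (fun x => x) false with
  | nil =>
    have hp : resids.Perm [] := (hs ▸ PySem.List.sorted_perm ..).symm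
    exact absurd (List.perm_nil.mp hp) hpre
  | cons r0 rest =>
    simp only []
    have hseed : ([r0] : List Int) =
        PySem.List.slice (r0 :: rest) (some ((0 : Nat) : Int)) (some ((1 : Nat) : Int)) := by
      rw [PySem.List.slice_natCast]; simp
    have := loop_inv break_resids (r0 :: rest) rest.length 1 (by simp; omega) [] 0 (by omega)
    rw [hseed]
    simpa using this
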